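-- pv_equiv track=rewrite | github.com/thayorch/204III | HW_13/HW13_EX.py | flag
-- ===== SOURCE A (Python) =====
-- def flag(list_a):
--     top_of_tow = max(list_a)
--     flag_s = ' '
--
--     for j in range(2):
--         for i in list_a:
--             flag_s += ' ' * i
--
--             if j == 0:
--                 if i == top_of_tow:
--                     flag_s += '|>>~'
--                 elif i < top_of_tow:
--                     flag_s += '    '
--
--             elif j == 1:
--                 if i == top_of_tow:
--                     flag_s += '|   '
--                 elif i < top_of_tow:
--                     flag_s += '    '
--
--             flag_s += ' ' * (i - 3)
--
--         flag_s += ' \n '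
--
--     for i in list_a:
--         flag_s += ' ' * (i - 2)
--         if i == top_of_tow:
--             flag_s += '/^^^\\ '
--         elif i < top_of_tow:
--             flag_s += '      '
--         flag_s += ' ' * (i - 3)
--
--     flag_s += ' \n'
--
--     return flag_s
-- ===== SOURCE B (Python) =====
-- def flag(list_a):
--     top = max(list_a)
--     r0, r1, r2 = [], [], []
--     for i in list_a:
--         pad = ' ' * (i - 3)
--         r0.append(' ' * i + ('|>>~' if i == top else '    ') + pad)
--         r1.append(' ' * i + ('|   ' if i == top else '    ') + pad)
--         r2.append(' ' * (i - 2) + ('/^^^\\ ' if i == top else '      ') + pad)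
--     return ' ' + ''.join(r0) + ' \n ' + ''.join(r1) + ' \n ' + ''.join(r2) + ' \n'
-- ===== Notes on version B (the rewrite author's own statement) =====
-- stated objective: alternative
-- what changed: A makes three separate sweeps (a range(2) loop plus a third loop) appending to one growing string with unreachable elif branches; B makes a single pass that builds the three rows' segments simultaneously into three lists and joins them once at the end.
import Mathlib
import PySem

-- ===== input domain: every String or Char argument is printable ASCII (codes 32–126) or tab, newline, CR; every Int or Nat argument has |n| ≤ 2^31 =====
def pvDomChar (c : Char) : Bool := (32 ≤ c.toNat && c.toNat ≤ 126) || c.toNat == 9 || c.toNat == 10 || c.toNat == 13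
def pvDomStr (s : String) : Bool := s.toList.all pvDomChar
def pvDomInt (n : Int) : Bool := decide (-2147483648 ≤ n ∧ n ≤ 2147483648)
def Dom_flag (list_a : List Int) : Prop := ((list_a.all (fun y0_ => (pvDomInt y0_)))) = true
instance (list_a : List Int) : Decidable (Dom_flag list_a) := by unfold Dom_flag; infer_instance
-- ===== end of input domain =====

-- B builds the three rows in one pass over the list (three segment lists joined at the end)
-- instead of A's three sweeps appending to one growing string; same cost, different decomposition.

-- ' ' * n  (Python string repetition: empty for n ≤ 0); exact via PySem.List.pyRepeat
def flagSp (n : Int) : String := String.ofList (PySem.List.pyRepeat [' '] n)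

-- ===== PORT A =====
def flag (list_a : List Int) : String :=
  -- max(list_a): raises on []; Pre_flag excludes the empty list, getD 0 is never taken there
  let top := (PySem.List.max? list_a (fun y => y)).getD 0
  let s := " "
  let s := (PySem.List.pyRange 0 2 1).foldl (fun s j =>
    (list_a.foldl (fun s i =>
      let s := s ++ flagSp i
      let s :=
        if j == 0 then
          (if i == top then s ++ "|>>~" else if i < top then s ++ "    " else s)
        else if j == 1 then
          (if i == top then s ++ "|   " else if i < top then s ++ "    " else s)
        else s
      s ++ flagSp (i - 3)) s) ++ " \n ") s
  let s := list_a.foldl (fun s i =>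
    let s := s ++ flagSp (i - 2)
    let s := if i == top then s ++ "/^^^\\ " else if i < top then s ++ "      " else s
    s ++ flagSp (i - 3)) s
  s ++ " \n"

-- ===== PORT B =====
def flag_alt (list_a : List Int) : String :=
  let top := (PySem.List.max? list_a (fun y => y)).getD 0
  let rows := list_a.foldl
    (fun (acc : List String × List String × List String) i =>
      let pad := flagSp (i - 3)
      (acc.1 ++ [flagSp i ++ (if i == top then "|>>~" else "    ") ++ pad],
       acc.2.1 ++ [flagSp i ++ (if i == top then "|   " else "    ") ++ pad],
       acc.2.2 ++ [flagSp (i - 2) ++ (if i == top then "/^^^\\ " else "      ") ++ pad]))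
    ([], [], [])
  " " ++ String.join rows.1 ++ " \n " ++ String.join rows.2.1 ++ " \n "
    ++ String.join rows.2.2 ++ " \n"

-- ===== PRECONDITION & SPEC =====
-- Pre_ excludes only the empty list, on which Python's max (in both A and B) raises ValueError.
def Pre_flag (list_a : List Int) : Prop := list_a ≠ []
instance (list_a : List Int) : Decidable (Pre_flag list_a) := by unfold Pre_flag; infer_instance
def pvWitness_flag : List Int := [3, 5, 2]

def Spec_flag (list_a : List Int) (out : String) : Prop := out = flag_alt list_a
instance (list_a : List Int) (out : String) : Decidable (Spec_flag list_a out) := by unfold Spec_flag; infer_instance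

-- ===== CLAIM (what is proved, stated in full; the proofs are below) =====
def Claim_equal_flag : Prop := ∀ (list_a : List Int), Dom_flag list_a → Pre_flag list_a → Spec_flag list_a (flag list_a)

-- ===== LEMMAS AND PROOFS =====


-- string-append fold with a running prefix
theorem flag_foldl_shift (l : List String) (a : String) :
    l.foldl (fun r s => r ++ s) a = a ++ l.foldl (fun r s => r ++ s) "" := by
  induction l generalizing a with
  | nil => simp
  | cons x t ih =>
    simp only [List.foldl_cons]
    rw [ih (a ++ x), ih ("" ++ x)]
    simp [String.append_assoc]

-- string-append fold = prefix ++ join of per-element pieces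
theorem flag_foldl_join (l : List Int) (f : Int → String) (acc : String) :
    l.foldl (fun s i => s ++ f i) acc = acc ++ String.join (l.map f) := by
  induction l generalizing acc with
  | nil => simp [String.join]
  | cons x t ih =>
    simp only [List.foldl_cons, List.map_cons, ih, String.join, List.foldl_cons]
    rw [flag_foldl_shift (List.map f t) ("" ++ f x)]
    simp [String.append_assoc]

-- B's triple accumulator fold = the three mapped lists
theorem flag_fold3 (l : List Int) (f g h : Int → String)
    (acc : List String × List String × List String) :
    l.foldl (fun acc i => (acc.1 ++ [f i], acc.2.1 ++ [g i], acc.2.2 ++ [h i])) acc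
      = (acc.1 ++ l.map f, acc.2.1 ++ l.map g, acc.2.2 ++ l.map h) := by
  induction l generalizing acc with
  | nil => simp
  | cons x t ih => simp [List.foldl_cons, ih]

theorem flag_spec' (list_a : List Int) (h : list_a ≠ []) :
    flag list_a = flag_alt list_a := by
  unfold flag flag_alt
  have htop : ∀ i ∈ list_a, i ≤ (PySem.List.max? list_a (fun y => y)).getD 0 := by
    intro i hi
    cases hmax : PySem.List.max? list_a (fun y => y) with
    | none => exact absurd ((PySem.List.max?_eq_none_iff _ _).1 hmax) h
    | some m => simpa using PySem.List.max?_isMax hmax i hi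
  set top := (PySem.List.max? list_a (fun y => y)).getD 0 with htoep
  have body : ∀ (p pad : Int → String) (segT segE : String) (s : String) (i : Int), i ∈ list_a →
      ((if (i == top) = true then s ++ p i ++ segT
          else if i < top then s ++ p i ++ segE else s ++ p i) ++ pad i)
        = s ++ (p i ++ (if (i == top) = true then segT else segE) ++ pad i) := by
    intro p pad segT segE s i hi
    rcases eq_or_lt_of_le (htop i hi) with he | hlt
    · simp [he, String.append_assoc]
    · have hne : ¬ (i == top) = true := by simp; omega
      simp [hne, hlt, String.append_assoc]
  have step : ∀ (p pad : Int → String) (segT segE : String) (init : String),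
      list_a.foldl (fun s i =>
        (if (i == top) = true then s ++ p i ++ segT
          else if i < top then s ++ p i ++ segE else s ++ p i) ++ pad i) init
        = init ++ String.join (list_a.map
            (fun i => p i ++ (if (i == top) = true then segT else segE) ++ pad i)) := by
    intro p pad segT segE init
    refine Eq.trans (PySem.List.foldl_congr_mem _ _ _ init ?_)
      (flag_foldl_join list_a
        (fun i => p i ++ (if (i == top) = true then segT else segE) ++ pad i) init)
    intro acc x hx
    exact body p pad segT segE acc x hx
  have rng : PySem.List.pyRange 0 2 1 = [0, 1] := by decide
  rw [rng]
  simp only [List.foldl_cons, List.foldl_nil]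
  simp only [show ((0:Int) == 0) = true from rfl, show ((1:Int) == 0) = false from rfl,
    show ((1:Int) == 1) = true from rfl, Bool.false_eq_true, if_true, if_false]
  rw [step flagSp (fun i => flagSp (i - 3)) "|>>~" "    ",
      step flagSp (fun i => flagSp (i - 3)) "|   " "    ",
      step (fun i => flagSp (i - 2)) (fun i => flagSp (i - 3)) "/^^^\\ " "      ",
      flag_fold3]
  simp [String.append_assoc]

-- ===== VERDICT (by name: the statement is the Claim_ definition above) =====
theorem flag_spec : Claim_equal_flag := by
  intro l _ hpre
  exact flag_spec' l hpre
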